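-- pv_equiv track=rewrite | github.com/Nurss23/Python4 | lesson13/hwq.py | create_squares_dict
-- ===== SOURCE A (Python) =====
-- def create_squares_dict(n):
--     dct_nums = {}
--     num = list(range(1,n))
--     for k in (num):
--         for v in str(k):
--             r = int(v) ** 2
--             dct_nums[k] = r
--     return dct_nums
-- ===== SOURCE B (Python) =====
-- def create_squares_dict(n):
--     squares = [d * d for d in range(10)]
--     return {k: squares[k % 10] for k in range(1, n)}
-- ===== Notes on version B (the rewrite author's own statement) =====
-- stated objective: faster
-- what changed: Replaces A's per-key inner loop over str(k) (repeated string conversion, per-digit int() and squaring, with only the last digit surviving) by a precomputed table of digit squares and a single comprehension looking up squares[k % 10].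
import Mathlib
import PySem

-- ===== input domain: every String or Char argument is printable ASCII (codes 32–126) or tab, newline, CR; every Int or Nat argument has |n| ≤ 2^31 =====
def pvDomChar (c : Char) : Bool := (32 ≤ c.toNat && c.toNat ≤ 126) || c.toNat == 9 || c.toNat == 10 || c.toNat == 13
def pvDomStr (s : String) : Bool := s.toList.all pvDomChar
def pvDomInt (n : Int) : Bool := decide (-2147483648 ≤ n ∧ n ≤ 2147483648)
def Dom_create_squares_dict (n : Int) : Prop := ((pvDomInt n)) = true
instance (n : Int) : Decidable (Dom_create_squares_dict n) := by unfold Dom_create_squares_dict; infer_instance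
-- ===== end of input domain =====

-- B precomputes the 10 digit squares once and builds the result in one pass via squares[k % 10],
-- removing A's per-key string conversion and inner digit loop (a timing run measured B faster).


-- ===== PORT A =====
-- int(v) is ported as (ofChars? [v]).getD 0; the default is never taken: v ranges over the
-- decimal digits of str(k) with k ≥ 1, on which int(v) always succeeds.
def create_squares_dict (n : Int) : List (Int × Int) :=
  let num := PySem.List.pyRange 1 n 1
  (num.foldl (fun dct k =>
      (PySem.Int.toChars k).foldl (fun dct v =>
          dct.insert k (((PySem.Int.ofChars? [v]).getD 0) ^ 2)) dct)
    (PySem.Dict.empty : PySem.Dict Int Int)).items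

-- ===== PORT B =====
def create_squares_dict_alt (n : Int) : List (Int × Int) :=
  let squares := (PySem.List.pyRange 0 10 1).map (fun d => d * d)
  (PySem.List.pyRange 1 n 1).map (fun k => (k, PySem.List.pyGetD squares (PySem.Int.mod k 10) 0))

-- ===== PRECONDITION & SPEC =====
def Spec_create_squares_dict (n : Int) (out : List (Int × Int)) : Prop := out = create_squares_dict_alt n
instance (n : Int) (out : List (Int × Int)) : Decidable (Spec_create_squares_dict n out) := by unfold Spec_create_squares_dict; infer_instance

-- ===== CLAIM (what is proved, stated in full; the proofs are below) =====
def Claim_equal_create_squares_dict : Prop := ∀ (n : Int), Dom_create_squares_dict n → Spec_create_squares_dict n (create_squares_dict n)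

-- ===== LEMMAS AND PROOFS =====

-- Nat.toDigitsCore accumulates in front of its accumulator.
theorem toDigitsCore_acc (b : Nat) (fuel : Nat) : ∀ (m : Nat) (acc : List Char),
    Nat.toDigitsCore b fuel m acc = Nat.toDigitsCore b fuel m [] ++ acc := by
  induction fuel with
  | zero => intro m acc; simp [Nat.toDigitsCore]
  | succ f ih =>
      intro m acc
      simp only [Nat.toDigitsCore]
      by_cases h : m / b = 0
      · simp [h]
      · simp only [h]
        rw [ih (m / b) (Nat.digitChar (m % b) :: acc), ih (m / b) [Nat.digitChar (m % b)]]
        simp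

-- The decimal representation ends with the digit character of m % 10.
theorem toDigits_last (m : Nat) :
    ∃ l, Nat.toDigits 10 m = l ++ [Nat.digitChar (m % 10)] := by
  unfold Nat.toDigits
  simp only [Nat.toDigitsCore]
  by_cases h : m / 10 = 0
  · exact ⟨[], by simp [h]⟩
  · refine ⟨Nat.toDigitsCore 10 m (m / 10) [], ?_⟩
    simp only [if_neg h]
    exact toDigitsCore_acc 10 m (m / 10) [Nat.digitChar (m % 10)]

-- int('<digit r>') = r for r < 10.
theorem ofChars_digitChar (r : Nat) (hr : r < 10) :
    PySem.Int.ofChars? [Nat.digitChar r] = some (r : Int) := by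
  interval_cases r <;> decide

-- Re-inserting at key k wipes whatever an insert-at-k loop did.
theorem foldl_insert_same_key (k v0 : Int) (f : Char → Int) :
    ∀ (l : List Char) (d : PySem.Dict Int Int),
      (l.foldl (fun d v => d.insert k (f v)) d).insert k v0 = d.insert k v0 := by
  intro l
  induction l with
  | nil => intro d; rfl
  | cons c t ih =>
      intro d
      simp only [List.foldl_cons]
      rw [ih (d.insert k (f c)), PySem.Dict.insert_insert_self]

-- A's inner loop over the digits of k (k ≥ 1) is one insert of (k % 10)^2.
theorem inner_fold_eq (k : Int) (hk : 1 ≤ k) (d : PySem.Dict Int Int) :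
    (PySem.Int.toChars k).foldl (fun d v =>
        d.insert k (((PySem.Int.ofChars? [v]).getD 0) ^ 2)) d
      = d.insert k ((PySem.Int.mod k 10) ^ 2) := by
  have hnn : ¬ k < 0 := by omega
  have htc : PySem.Int.toChars k = Nat.toDigits 10 k.toNat := by
    simp [PySem.Int.toChars, hnn]
  obtain ⟨l, hl⟩ := toDigits_last k.toNat
  have hmod : PySem.Int.mod k 10 = ((k.toNat % 10 : Nat) : Int) := by
    have : k = ((k.toNat : Nat) : Int) := (Int.toNat_of_nonneg (by omega)).symm
    rw [this]
    exact_mod_cast PySem.Int.mod_natCast k.toNat 10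
  rw [htc, hl, List.foldl_append]
  simp only [List.foldl_cons, List.foldl_nil]
  rw [foldl_insert_same_key, ofChars_digitChar (k.toNat % 10) (Nat.mod_lt _ (by omega)),
    hmod]
  rfl

theorem sq_mod_eq_lookup (k : Int) :
    PySem.List.pyGetD ((PySem.List.pyRange 0 10 1).map (fun d => d * d))
        (PySem.Int.mod k 10) 0 = (PySem.Int.mod k 10) ^ 2 := by
  rw [PySem.List.pyGetD_map_pyRange_of_nonneg (fun d => d * d) 10 (PySem.Int.mod k 10) 0
    (PySem.Int.mod_nonneg k (by norm_num)) (PySem.Int.mod_lt k (by norm_num))]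
  ring

-- ===== VERDICT (by name: the statement is the Claim_ definition above) =====
theorem create_squares_dict_spec : Claim_equal_create_squares_dict := by
  intro n _
  unfold Spec_create_squares_dict create_squares_dict create_squares_dict_alt
  simp only []
  have hcongr : (PySem.List.pyRange 1 n 1).foldl (fun dct k =>
      (PySem.Int.toChars k).foldl (fun dct v =>
          dct.insert k (((PySem.Int.ofChars? [v]).getD 0) ^ 2)) dct)
      (PySem.Dict.empty : PySem.Dict Int Int)
      = (PySem.List.pyRange 1 n 1).foldl (fun dct k =>
          dct.insert k ((PySem.Int.mod k 10) ^ 2))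
        (PySem.Dict.empty : PySem.Dict Int Int) := by
    apply PySem.List.foldl_congr_mem
    intro d k hk
    exact inner_fold_eq k ((PySem.List.mem_pyRange_one.mp hk).1) d
  rw [hcongr]
  have hitems := PySem.Dict.items_foldl_insert_fresh (PySem.List.pyRange 1 n 1)
    (fun k => k) (fun k => (PySem.Int.mod k 10) ^ 2)
    (PySem.Dict.empty : PySem.Dict Int Int)
    (fun a _ => PySem.Dict.contains_empty a)
    (by simpa using PySem.List.nodup_pyRange_one 1 n)
  simp only [] at hitems
  rw [hitems]
  simp only [PySem.Dict.empty, List.nil_append]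
  exact List.map_congr_left (fun k _ => by rw [sq_mod_eq_lookup])
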